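-- pv_equiv track=rewrite | github.com/rajmehta89/call_agent_backend | qa_engine.py | is_exit_intent
-- ===== SOURCE A (Python) =====
-- def is_exit_intent(user_input: str) -> bool:
--     """Check if user wants to exit"""
--     user_input = user_input.lower()
--     exit_keywords = [
--         "bye", "goodbye", "see you", "exit", "quit",
--         "stop", "end", "finish", "done", "thank you",
--         "thanks", "that's all", "no more", "nothing else",
--         "i'm done", "gotta go", "have to go", "talk later"
--     ]
--     return any(keyword in user_input for keyword in exit_keywords)
-- ===== SOURCE B (Python) =====
-- def is_exit_intent(user_input: str) -> bool:
--     """Check if user wants to exit"""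
--     text = user_input.lower()
--     exit_keywords = [
--         "bye", "goodbye", "see you", "exit", "quit",
--         "stop", "end", "finish", "done", "thank you",
--         "thanks", "that's all", "no more", "nothing else",
--         "i'm done", "gotta go", "have to go", "talk later"
--     ]
--     # position-major single scan: at each position, test whether some keyword starts there
--     return any(
--         any(text.startswith(k, i) for k in exit_keywords)
--         for i in range(len(text) + 1)
--     )
-- ===== Notes on version B (the rewrite author's own statement) =====
-- stated objective: alternative
-- what changed: Keyword-major repeated substring scans ('k in text' per keyword) are replaced by a position-major single left-to-right sweep that at each index tests whether some keyword starts there (text.startswith(k, i)).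
import Mathlib
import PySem

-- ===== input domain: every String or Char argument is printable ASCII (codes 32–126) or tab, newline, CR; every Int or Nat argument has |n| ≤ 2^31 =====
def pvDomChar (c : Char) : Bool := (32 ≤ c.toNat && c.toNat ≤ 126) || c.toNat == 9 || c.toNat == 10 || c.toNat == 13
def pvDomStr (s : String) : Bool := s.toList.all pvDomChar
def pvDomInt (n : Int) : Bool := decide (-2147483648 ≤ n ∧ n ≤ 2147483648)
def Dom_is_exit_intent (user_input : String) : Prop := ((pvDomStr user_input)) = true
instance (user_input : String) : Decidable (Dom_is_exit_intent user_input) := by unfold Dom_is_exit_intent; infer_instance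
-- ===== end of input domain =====

-- B replaces the keyword-major repeated substring scans with a position-major
-- sweep testing each keyword as a prefix at each index (alternative, same result).


-- ===== PORT A =====
def pvExitKeywordsA : List String :=
  ["bye", "goodbye", "see you", "exit", "quit",
   "stop", "end", "finish", "done", "thank you",
   "thanks", "that's all", "no more", "nothing else",
   "i'm done", "gotta go", "have to go", "talk later"]

def is_exit_intent (user_input : String) : Bool :=
  let text := PySem.Str.lower user_input
  pvExitKeywordsA.any (fun k => PySem.Str.isIn k text)

-- ===== PORT B =====
def pvExitKeywordsB : List (List Char) :=
  ["bye".toList, "goodbye".toList, "see you".toList, "exit".toList, "quit".toList,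
   "stop".toList, "end".toList, "finish".toList, "done".toList, "thank you".toList,
   "thanks".toList, "that's all".toList, "no more".toList, "nothing else".toList,
   "i'm done".toList, "gotta go".toList, "have to go".toList, "talk later".toList]

-- text.startswith(k, i) with 0 ≤ i ≤ len(text) is exactly "k is a prefix of text[i:]"
def is_exit_intent_alt (user_input : String) : Bool :=
  let text := PySem.Chars.lower user_input.toList
  (List.range (text.length + 1)).any (fun i =>
    pvExitKeywordsB.any (fun k => PySem.Chars.startswith (text.drop i) k))

-- ===== PRECONDITION & SPEC =====
def Spec_is_exit_intent (user_input : String) (out : Bool) : Prop := out = is_exit_intent_alt user_input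
instance (user_input : String) (out : Bool) : Decidable (Spec_is_exit_intent user_input out) := by unfold Spec_is_exit_intent; infer_instance

-- ===== CLAIM (what is proved, stated in full; the proofs are below) =====
def Claim_equal_is_exit_intent : Prop := ∀ (user_input : String), Dom_is_exit_intent user_input → Spec_is_exit_intent user_input (is_exit_intent user_input)

-- ===== LEMMAS AND PROOFS =====

theorem pv_isIn_iff_bounded_prefix (k t : List Char) :
    PySem.Chars.isIn k t = true ↔ ∃ i < t.length + 1, k <+: t.drop i := by
  constructor
  · intro h
    obtain ⟨j, hj⟩ := (PySem.Chars.exists_prefix_drop_iff_isIn k t).2 h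
    by_cases hle : j ≤ t.length
    · exact ⟨j, by omega, hj⟩
    · have hnil : t.drop j = [] := List.drop_eq_nil_of_le (by omega)
      have hk : k = [] := List.prefix_nil.mp (hnil ▸ hj)
      exact ⟨t.length, by omega, by simp [hk]⟩
  · rintro ⟨i, _, hi⟩
    exact (PySem.Chars.exists_prefix_drop_iff_isIn k t).1 ⟨i, hi⟩

theorem pv_keywords_eq : pvExitKeywordsB = pvExitKeywordsA.map String.toList := by decide

-- ===== VERDICT (by name: the statement is the Claim_ definition above) =====
theorem is_exit_intent_spec : Claim_equal_is_exit_intent := by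
  intro u _
  unfold Spec_is_exit_intent is_exit_intent is_exit_intent_alt
  simp only [pv_keywords_eq, List.any_map]
  rw [Bool.eq_iff_iff]
  simp only [List.any_eq_true, List.mem_range, Function.comp,
    PySem.Chars.startswith_iff]
  constructor
  · rintro ⟨k, hk, hin⟩
    have : PySem.Chars.isIn k.toList (PySem.Chars.lower u.toList) = true := by
      have := PySem.Str.isIn_iff_infix (sub := k) (s := PySem.Str.lower u)
      rw [PySem.Str.toList_lower] at this
      exact (PySem.Chars.isIn_iff_infix _ _).2 (this.1 hin)
    obtain ⟨i, hilt, hi⟩ := (pv_isIn_iff_bounded_prefix _ _).1 this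
    exact ⟨i, hilt, k, hk, hi⟩
  · rintro ⟨i, hilt, k, hk, hi⟩
    have : PySem.Chars.isIn k.toList (PySem.Chars.lower u.toList) = true :=
      (pv_isIn_iff_bounded_prefix _ _).2 ⟨i, hilt, hi⟩
    refine ⟨k, hk, ?_⟩
    have h2 := PySem.Str.isIn_iff_infix (sub := k) (s := PySem.Str.lower u)
    rw [PySem.Str.toList_lower] at h2
    exact h2.2 ((PySem.Chars.isIn_iff_infix _ _).1 this)
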